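-- pv_equiv track=rewrite | github.com/pypi-data/pypi-mirror-402 | packages/seawolf/seawolf-2.0.4-py3-none-any.whl/seawolf/_ax_functions.py | __split_to_half_string__
-- ===== SOURCE A (Python) =====
-- def __split_to_half_string__(input_string):
--     words = input_string.split()
--     npals = int(len(words) / 2) + 1
--     added = True
--     modified_words = []
--     for i, word in enumerate(words):
--         modified_words.append(word)
--         if (
--             (i + 1) % npals == 0
--         ) & added:  # Check if it's the 3rd, 6th, 9th word, etc.
--             modified_words.append("\n")
--             added = False
--         else:
--             modified_words.append(" ")
--     return "".join(modified_words).strip()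
-- ===== SOURCE B (Python) =====
-- def __split_to_half_string__(input_string):
--     words = input_string.split()
--     npals = len(words) // 2 + 1
--     return (" ".join(words[:npals]) + "\n" + " ".join(words[npals:])).strip()
-- ===== Notes on version B (the rewrite author's own statement) =====
-- stated objective: simpler
-- what changed: Replaces the per-word loop with its boolean once-flag, modulo test and separator list by a single computed split index and two slice-joins around one newline.
import Mathlib
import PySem

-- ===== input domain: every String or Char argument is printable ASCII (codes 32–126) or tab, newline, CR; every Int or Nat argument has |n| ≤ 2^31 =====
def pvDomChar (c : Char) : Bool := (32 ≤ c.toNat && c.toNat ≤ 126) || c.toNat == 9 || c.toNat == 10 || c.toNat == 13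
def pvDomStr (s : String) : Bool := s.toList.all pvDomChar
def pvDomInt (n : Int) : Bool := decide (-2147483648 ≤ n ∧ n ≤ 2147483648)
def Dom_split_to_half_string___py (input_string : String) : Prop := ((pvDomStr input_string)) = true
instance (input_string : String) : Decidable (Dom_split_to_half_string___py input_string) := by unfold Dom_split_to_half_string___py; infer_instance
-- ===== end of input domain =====

-- B replaces A's per-word loop with its boolean once-flag and modulo test by a computed
-- split index and two slice-joins around one newline (simpler decomposition, same cost).

-- ===== PORT A =====
def split_to_half_string___py (input_string : String) : String :=
  let words := PySem.Chars.split₀ input_string.toList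
  let npals : Int := PySem.Int.truncdiv (PySem.List.len words) 2 + 1
  -- for i, word in enumerate(words): append word, then "\n" (once, via the flag) or " "
  let st := (PySem.List.enumerate words 0).foldl
    (fun (st : List (List Char) × Bool) (iw : Int × List Char) =>
      if (PySem.Int.mod (iw.1 + 1) npals == 0) && st.2 then
        (st.1 ++ [iw.2] ++ [['\n']], false)
      else
        (st.1 ++ [iw.2] ++ [[' ']], st.2))
    (([] : List (List Char)), true)
  String.ofList (PySem.Chars.strip (PySem.Chars.join [] st.1))

-- ===== PORT B =====
def split_to_half_string___py_alt (input_string : String) : String :=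
  let words := PySem.Chars.split₀ input_string.toList
  let npals : Int := PySem.Int.floordiv (PySem.List.len words) 2 + 1
  String.ofList (PySem.Chars.strip
    (PySem.Chars.join [' '] (PySem.List.slice words none (some npals)) ++
      '\n' :: PySem.Chars.join [' '] (PySem.List.slice words (some npals) none)))

-- ===== PRECONDITION & SPEC =====
def Spec_split_to_half_string___py (input_string : String) (out : String) : Prop := out = split_to_half_string___py_alt input_string
instance (input_string : String) (out : String) : Decidable (Spec_split_to_half_string___py input_string out) := by unfold Spec_split_to_half_string___py; infer_instance

-- ===== CLAIM (what is proved, stated in full; the proofs are below) =====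
def Claim_equal_split_to_half_string___py : Prop := ∀ (input_string : String), Dom_split_to_half_string___py input_string → Spec_split_to_half_string___py input_string (split_to_half_string___py input_string)

-- ===== LEMMAS AND PROOFS =====

-- the pieces A's loop emits: each word followed by " ", except the r-th remaining
-- word (counting from the current position), which is followed by "\n"
def pvPieces : List (List Char) → Nat → List (List Char)
  | [], _ => []
  | w :: ws, r => w :: (if r = 1 then ['\n'] :: pvPieces ws 0 else [' '] :: pvPieces ws (r - 1))

theorem pvFold_false (npals : Int) :
    ∀ (ws : List (List Char)) (i : Int) (acc : List (List Char)),
    ((PySem.List.enumerate ws i).foldl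
      (fun (st : List (List Char) × Bool) (iw : Int × List Char) =>
        if (PySem.Int.mod (iw.1 + 1) npals == 0) && st.2 then
          (st.1 ++ [iw.2] ++ [['\n']], false)
        else
          (st.1 ++ [iw.2] ++ [[' ']], st.2))
      (acc, false)) = (acc ++ pvPieces ws 0, false) := by
  intro ws
  induction ws with
  | nil => intro i acc; simp [PySem.List.enumerate_nil, pvPieces]
  | cons w ws ih =>
    intro i acc
    rw [PySem.List.enumerate_cons, List.foldl_cons]
    have hc : ((PySem.Int.mod (i + 1) npals == 0) && false) = false := by simp
    rw [if_neg (by rw [hc]; exact Bool.false_ne_true)]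
    rw [ih]
    simp [pvPieces]

theorem pvFold_true (npals : Int) :
    ∀ (ws : List (List Char)) (r : Nat) (i : Int) (acc : List (List Char)),
    0 ≤ i → npals = i + r → 1 ≤ r →
    ((PySem.List.enumerate ws i).foldl
      (fun (st : List (List Char) × Bool) (iw : Int × List Char) =>
        if (PySem.Int.mod (iw.1 + 1) npals == 0) && st.2 then
          (st.1 ++ [iw.2] ++ [['\n']], false)
        else
          (st.1 ++ [iw.2] ++ [[' ']], st.2))
      (acc, true)) = (acc ++ pvPieces ws r, decide (ws.length < r)) := by
  intro ws
  induction ws with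
  | nil =>
    intro r i acc h0 hnp hr
    simp [PySem.List.enumerate_nil, pvPieces]
    omega
  | cons w ws ih =>
    intro r i acc h0 hnp hr
    have hpos : 0 < npals := by omega
    rw [PySem.List.enumerate_cons, List.foldl_cons]
    by_cases hr1 : r = 1
    · subst hr1
      have hi : i + 1 = npals := by omega
      have hmod : PySem.Int.mod (i + 1) npals = 0 := by
        rw [PySem.Int.mod_eq_emod_of_pos hpos, hi]
        exact Int.emod_self
      have hc : ((PySem.Int.mod (i + 1) npals == 0) && true) = true := by simp [hmod]
      rw [if_pos hc]
      rw [pvFold_false]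
      rw [show pvPieces (w :: ws) 1 = w :: ['\n'] :: pvPieces ws 0 from rfl]
      simp
    · have hmod : PySem.Int.mod (i + 1) npals = i + 1 := by
        rw [PySem.Int.mod_eq_emod_of_pos hpos]
        exact Int.emod_eq_of_lt (by omega) (by omega)
      have hc : ((PySem.Int.mod (i + 1) npals == 0) && true) = false := by
        simp [hmod]; omega
      rw [if_neg (by rw [hc]; exact Bool.false_ne_true)]
      rw [ih (r - 1) (i + 1) _ (by omega) (by omega) (by omega)]
      rw [show pvPieces (w :: ws) r = w :: [' '] :: pvPieces ws (r - 1) from by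
        simp [pvPieces]; omega]
      have hdec : decide (ws.length < r - 1) = decide ((w :: ws).length < r) :=
        decide_eq_decide.mpr (by simp; omega)
      rw [hdec]
      simp

-- joining the pieces with "" : a cons-step bridge
theorem pvJoin_nil_cons (p : List Char) (L : List (List Char)) (h : L ≠ []) :
    PySem.Chars.join [] (p :: L) = p ++ PySem.Chars.join [] L := by
  cases L with
  | nil => exact absurd rfl h
  | cons q rest => rw [PySem.Chars.join_cons_cons]; simp

theorem pvPieces_ne_nil (w : List Char) (ws : List (List Char)) (r : Nat) :
    pvPieces (w :: ws) r ≠ [] := by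
  simp [pvPieces]

theorem pvPieces_zero (ws : List (List Char)) (hne : ws ≠ []) :
    PySem.Chars.join [] (pvPieces ws 0) = PySem.Chars.join [' '] ws ++ [' '] := by
  induction ws with
  | nil => simp at hne
  | cons w ws ih =>
    rw [show pvPieces (w :: ws) 0 = w :: [' '] :: pvPieces ws 0 from rfl]
    rw [pvJoin_nil_cons _ _ (by simp)]
    match ws with
    | [] =>
      simp [pvPieces, PySem.Chars.join_singleton, PySem.Chars.join_nil]
    | v :: vs =>
      rw [pvJoin_nil_cons _ _ (pvPieces_ne_nil v vs 0)]
      rw [ih (by simp)]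
      rw [PySem.Chars.join_cons_cons]
      simp

theorem pvPieces_spec :
    ∀ (r : Nat) (ws : List (List Char)), 1 ≤ r → r ≤ ws.length →
    PySem.Chars.join [] (pvPieces ws r) =
      PySem.Chars.join [' '] (ws.take r) ++ '\n' :: PySem.Chars.join [' '] (ws.drop r)
        ++ (if r = ws.length then [] else [' ']) := by
  intro r
  induction r with
  | zero => omega
  | succ r ih =>
    intro ws hr hle
    match ws with
    | [] => simp at hle
    | w :: ws =>
      by_cases hr1 : r = 0
      · subst hr1
        rw [show pvPieces (w :: ws) 1 = w :: ['\n'] :: pvPieces ws 0 from rfl]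
        match ws with
        | [] =>
          simp [pvPieces, PySem.Chars.join_singleton, PySem.Chars.join_nil,
            pvJoin_nil_cons]
        | v :: vs =>
          rw [pvJoin_nil_cons _ _ (by simp)]
          rw [pvJoin_nil_cons _ _ (pvPieces_ne_nil v vs 0)]
          rw [pvPieces_zero _ (by simp)]
          rw [if_neg (by simp)]
          simp [PySem.Chars.join_singleton]
      · -- r + 1 ≥ 2: the head word gets " " and we recurse with r
        have hws : ws ≠ [] := by
          intro h; subst h; simp at hle; omega
        rw [show pvPieces (w :: ws) (r + 1) = w :: [' '] :: pvPieces ws r from by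
          simp [pvPieces]; omega]
        rw [pvJoin_nil_cons _ _ (by simp)]
        rw [pvJoin_nil_cons _ _ (by
          cases ws with
          | nil => exact absurd rfl hws
          | cons v vs => exact pvPieces_ne_nil v vs r)]
        rw [ih ws (by omega) (by simpa using hle)]
        rw [show (w :: ws).take (r + 1) = w :: ws.take r from rfl]
        rw [show (w :: ws).drop (r + 1) = ws.drop r from rfl]
        rw [show PySem.Chars.join [' '] (w :: ws.take r)
              = w ++ [' '] ++ PySem.Chars.join [' '] (ws.take r) from by
          cases h : ws.take r with
          | nil =>
            rcases List.take_eq_nil_iff.mp h with h0 | h0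
            · exact absurd h0 hr1
            · exact absurd h0 hws
          | cons p ps => rw [PySem.Chars.join_cons_cons]]
        have hiff : (r + 1 = (w :: ws).length) ↔ (r = ws.length) := by
          simp
        rw [if_congr hiff rfl rfl]
        simp

theorem pvStrip_space (x : List Char) :
    PySem.Chars.strip (x ++ [' ']) = PySem.Chars.strip x := by
  have hsp : PySem.Chars.isspace ' ' = true := rfl
  unfold PySem.Chars.strip PySem.Chars.lstrip PySem.Chars.rstrip
  rw [List.dropWhile_append]
  by_cases h : (List.dropWhile PySem.Chars.isspace x).isEmpty = true
  · rw [if_pos h]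
    rw [List.isEmpty_iff] at h
    rw [h]
    rw [show List.dropWhile PySem.Chars.isspace [' '] = [] from by
      simp [List.dropWhile, hsp]]
  · rw [if_neg h]
    rw [List.reverse_append]
    rw [show ([' '] : List Char).reverse = [' '] from rfl]
    rw [show ([' '] : List Char) ++ (List.dropWhile PySem.Chars.isspace x).reverse
          = ' ' :: (List.dropWhile PySem.Chars.isspace x).reverse from rfl]
    simp [List.dropWhile, hsp]

theorem pvTruncdiv_cast (n : Nat) : PySem.Int.truncdiv (n : Int) 2 = ((n / 2 : Nat) : Int) := by
  simp [PySem.Int.truncdiv]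

-- ===== VERDICT (by name: the statement is the Claim_ definition above) =====
theorem split_to_half_string___py_spec : Claim_equal_split_to_half_string___py := by
  intro s _
  unfold Spec_split_to_half_string___py split_to_half_string___py split_to_half_string___py_alt
  simp only []
  generalize PySem.Chars.split₀ s.toList = ws
  have hB : PySem.Int.floordiv (PySem.List.len ws) 2 + 1 = ((ws.length / 2 + 1 : Nat) : Int) := by
    rw [PySem.List.len_eq, show ((2:Int) = ((2:Nat):Int)) from rfl, PySem.Int.floordiv_natCast]
    push_cast; ring
  rw [hB]
  rw [PySem.List.slice_to ws (Int.natCast_nonneg _), PySem.List.slice_from ws (Int.natCast_nonneg _)]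
  rw [Int.toNat_natCast]
  cases hne : ws with
  | nil =>
    simp [PySem.List.enumerate_nil, PySem.Chars.join_nil]
    rfl
  | cons w t =>
    rw [← hne]
    have hn1 : 1 ≤ ws.length := by rw [hne]; simp
    have hkn : ws.length / 2 + 1 ≤ ws.length := by omega
    have hfold := pvFold_true (PySem.Int.truncdiv (PySem.List.len ws) 2 + 1) ws (ws.length / 2 + 1) 0 []
      le_rfl (by rw [PySem.List.len_eq, pvTruncdiv_cast]; push_cast; ring) (by omega)
    rw [hfold]
    simp only [List.nil_append]
    rw [pvPieces_spec (ws.length / 2 + 1) ws (by omega) hkn]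
    by_cases heq : ws.length / 2 + 1 = ws.length
    · rw [if_pos heq]
      simp
    · rw [if_neg heq]
      rw [pvStrip_space]
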